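-- pv_equiv track=rewrite | github.com/ThorD125/schoolWork | programming fundamentals S1 Python/exercises/topic06_functions/assignment07.py | triangle
-- ===== SOURCE A (Python) =====
-- def line(stars, filled=True, shift=0, first_sign="*"):
--     line = ""
--     for i in range(shift):
--         line += " "
--
--     for i in range(stars):
--         if i == 0 or i == stars - 1:
--             line += first_sign
--         elif filled:
--             line += first_sign
--         else:
--             line += " "
--
--     return line
--
-- def triangle(base, filled=True, indent=0, char="*", align_right=False):
--     triangle = ""
--     i = 1
--     while i <= base:
--         if i == base:
--             triangle += line(i, True, indent, char)
--         else:
--             triangle += line(i, filled, indent, char)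
--
--         if i < base:
--             triangle += "\n"
--         i += 1
--     return triangle
-- ===== SOURCE B (Python) =====
-- def triangle(base, filled=True, indent=0, char="*", align_right=False):
--     rows = []
--     for i in range(1, base + 1):
--         f = filled or i == base
--         body = char if i == 1 else char + (char if f else " ") * (i - 2) + char
--         rows.append(" " * indent + body)
--     return "\n".join(rows)
-- ===== Notes on version B (the rewrite author's own statement) =====
-- stated objective: simpler
-- what changed: Replaces the per-character inner loops of the line helper and the '+=' string accumulation with direct row construction by string multiplication (padding and hollow middle) and a single '\n'.join over a list of rows.
import Mathlib
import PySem

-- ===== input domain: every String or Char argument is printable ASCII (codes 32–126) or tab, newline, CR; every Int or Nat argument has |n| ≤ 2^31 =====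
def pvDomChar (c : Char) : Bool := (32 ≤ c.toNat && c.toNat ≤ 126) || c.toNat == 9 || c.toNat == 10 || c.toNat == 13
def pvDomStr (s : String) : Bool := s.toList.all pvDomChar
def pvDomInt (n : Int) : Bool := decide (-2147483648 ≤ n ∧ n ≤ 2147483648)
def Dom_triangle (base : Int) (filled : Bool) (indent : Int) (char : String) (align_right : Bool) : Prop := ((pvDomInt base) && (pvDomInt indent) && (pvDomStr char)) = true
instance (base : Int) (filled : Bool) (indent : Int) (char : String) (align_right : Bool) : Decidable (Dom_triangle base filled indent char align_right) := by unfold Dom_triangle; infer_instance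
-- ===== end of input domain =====

-- B drops the per-character `line` helper: each row is built directly with string
-- multiplication and the rows are joined with '\n'.join (simpler decomposition, same cost).

-- ===== PORT A =====
-- Python strings are ported as their List Char contents (PySem.Chars side), wrapped
-- back with String.mk at the end; exact for string concatenation on every input.

-- helper `line(stars, filled, shift, first_sign)`: two character-appending for-loops
def lineA (stars : Int) (filled : Bool) (shift : Int) (first_sign : List Char) : List Char :=
  let l := (PySem.List.pyRange 0 shift 1).foldl (fun acc _ => acc ++ [' ']) []
  (PySem.List.pyRange 0 stars 1).foldl
    (fun acc i =>
      if i = 0 ∨ i = stars - 1 then acc ++ first_sign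
      else if filled then acc ++ first_sign
      else acc ++ [' ']) l

-- the `while i <= base` loop; fuel `base.toNat` is exactly the number of iterations
def triAuxA (base : Int) (filled : Bool) (indent : Int) (ch : List Char) :
    Nat → Int → List Char → List Char
  | 0, _, acc => acc
  | n + 1, i, acc =>
    if i ≤ base then
      let acc := if i = base then acc ++ lineA i true indent ch
                 else acc ++ lineA i filled indent ch
      let acc := if i < base then acc ++ ['\n'] else acc
      triAuxA base filled indent ch n (i + 1) acc
    else acc

def triangle (base : Int) (filled : Bool) (indent : Int) (char : String) (align_right : Bool) : String :=
  String.mk (triAuxA base filled indent char.toList base.toNat 1 [])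

-- ===== PORT B =====
-- rows.append(pad + body) over range(1, base+1), then "\n".join(rows)
def triangle_alt (base : Int) (filled : Bool) (indent : Int) (char : String) (align_right : Bool) : String :=
  let rows := (PySem.List.pyRange 1 (base + 1) 1).foldl
    (fun rows i =>
      let f := filled || i == base
      let body := if i = 1 then char.toList
                  else char.toList ++ PySem.List.pyRepeat (if f then char.toList else [' ']) (i - 2) ++ char.toList
      rows ++ [PySem.List.pyRepeat [' '] indent ++ body]) []
  String.mk (PySem.Chars.join ['\n'] rows)

-- ===== PRECONDITION & SPEC =====
def Spec_triangle (base : Int) (filled : Bool) (indent : Int) (char : String) (align_right : Bool) (out : String) : Prop := out = triangle_alt base filled indent char align_right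
instance (base : Int) (filled : Bool) (indent : Int) (char : String) (align_right : Bool) (out : String) : Decidable (Spec_triangle base filled indent char align_right out) := by unfold Spec_triangle; infer_instance

-- ===== CLAIM (what is proved, stated in full; the proofs are below) =====
def Claim_equal_triangle : Prop := ∀ (base : Int) (filled : Bool) (indent : Int) (char : String) (align_right : Bool), Dom_triangle base filled indent char align_right → Spec_triangle base filled indent char align_right (triangle base filled indent char align_right)

-- ===== LEMMAS AND PROOFS =====

-- B's row, as a function (what the foldl in triangle_alt appends for each i)
def rowB (base : Int) (filled : Bool) (indent : Int) (ch : List Char) (i : Int) : List Char :=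
  PySem.List.pyRepeat [' '] indent ++
    (if i = 1 then ch
     else ch ++ PySem.List.pyRepeat (if filled || i == base then ch else [' ']) (i - 2) ++ ch)

-- a foldl that appends the same chunk once per range element is a pyRepeat
theorem foldl_const_append (mid : List Char) :
    ∀ (n : Nat) (a b : Int) (acc : List Char), n = (b - a).toNat →
      (PySem.List.pyRange a b 1).foldl (fun acc _ => acc ++ mid) acc =
        acc ++ (List.replicate n mid).flatten := by
  intro n
  induction n with
  | zero =>
    intro a b acc h
    rw [PySem.List.pyRange_one_eq_nil (by omega)]
    simp
  | succ k ih =>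
    intro a b acc h
    rw [PySem.List.pyRange_one_cons (by omega)]
    simp only [List.foldl_cons]
    rw [ih (a + 1) b _ (by omega)]
    simp [List.replicate_succ]

-- the `line` helper equals indent padding ++ B's row body
theorem lineA_eq (stars : Int) (fl : Bool) (shift : Int) (ch : List Char) (h1 : 1 ≤ stars) :
    lineA stars fl shift ch =
      PySem.List.pyRepeat [' '] shift ++
        (if stars = 1 then ch
         else ch ++ PySem.List.pyRepeat (if fl then ch else [' ']) (stars - 2) ++ ch) := by
  unfold lineA
  have hpad : (PySem.List.pyRange 0 shift 1).foldl (fun acc _ => acc ++ [' ']) ([] : List Char) =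
      PySem.List.pyRepeat [' '] shift := by
    rw [foldl_const_append [' '] (shift - 0).toNat 0 shift [] rfl]
    simp [PySem.List.pyRepeat]
  rw [hpad]
  by_cases hs : stars = 1
  · subst hs
    rw [show PySem.List.pyRange 0 1 1 = [0] from rfl]
    simp
  · -- stars ≥ 2
    have h2 : 2 ≤ stars := by omega
    rw [PySem.List.pyRange_one_append 0 1 stars (by omega) (by omega),
        PySem.List.pyRange_one_append 1 (stars - 1) stars (by omega) (by omega),
        show PySem.List.pyRange 0 1 1 = [0] from rfl,
        PySem.List.pyRange_one_cons (show stars - 1 < stars by omega),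
        PySem.List.pyRange_one_eq_nil (show stars ≤ stars - 1 + 1 by omega)]
    simp only [List.foldl_append, List.foldl_cons, List.foldl_nil,
      true_or, or_true, if_true]
    have hmid : (PySem.List.pyRange 1 (stars - 1) 1).foldl
        (fun acc i =>
          if i = 0 ∨ i = stars - 1 then acc ++ ch
          else if fl then acc ++ ch else acc ++ [' '])
        (PySem.List.pyRepeat [' '] shift ++ ch) =
        PySem.List.pyRepeat [' '] shift ++ ch ++
          PySem.List.pyRepeat (if fl then ch else [' ']) (stars - 2) := by
      rw [PySem.List.foldl_congr_mem _ _ (fun acc _ => acc ++ (if fl then ch else [' '])) _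
        (by
          intro acc x hx
          rw [PySem.List.mem_pyRange_one] at hx
          rw [if_neg (by omega)]
          by_cases hfl : fl <;> simp [hfl])]
      rw [foldl_const_append _ (stars - 2).toNat 1 (stars - 1) _ (by omega)]
      rfl
    rw [hmid, if_neg hs]
    simp [List.append_assoc]

-- A's while-loop produces the join of B's rows from i to base
theorem triAuxA_eq (base : Int) (filled : Bool) (indent : Int) (ch : List Char) :
    ∀ (n : Nat) (i : Int) (acc : List Char), 1 ≤ i → n = (base + 1 - i).toNat →
      triAuxA base filled indent ch n i acc =
        acc ++ PySem.Chars.join ['\n']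
          ((PySem.List.pyRange i (base + 1) 1).map (rowB base filled indent ch)) := by
  intro n
  induction n with
  | zero =>
    intro i acc h1 hn
    rw [PySem.List.pyRange_one_eq_nil (by omega)]
    simp [triAuxA, PySem.Chars.join_nil]
  | succ k ih =>
    intro i acc h1 hn
    have hib : i ≤ base := by omega
    have hrow : (if i = base then acc ++ lineA i true indent ch
                 else acc ++ lineA i filled indent ch) =
        acc ++ rowB base filled indent ch i := by
      by_cases h : i = base
      · rw [if_pos h, lineA_eq i true indent ch h1, rowB]
        simp [h]
      · rw [if_neg h, lineA_eq i filled indent ch h1, rowB]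
        have : (i == base) = false := by simp [h]
        simp [this]
    simp only [triAuxA, if_pos hib, hrow]
    rw [PySem.List.pyRange_one_cons (show i < base + 1 by omega)]
    by_cases hlt : i < base
    · rw [if_pos hlt, ih (i + 1) _ (by omega) (by omega)]
      rw [PySem.List.pyRange_one_cons (show i + 1 < base + 1 by omega)]
      simp only [List.map_cons]
      rw [PySem.Chars.join_cons_cons]
      simp [List.append_assoc]
    · have hieq : i = base := by omega
      rw [if_neg hlt, ih (i + 1) _ (by omega) (by omega)]
      rw [PySem.List.pyRange_one_eq_nil (show base + 1 ≤ i + 1 by omega)]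
      simp [PySem.Chars.join_nil, PySem.Chars.join_singleton]

-- ===== VERDICT (by name: the statement is the Claim_ definition above) =====
theorem triangle_spec : Claim_equal_triangle := by
  intro base filled indent char align_right _
  unfold Spec_triangle triangle triangle_alt
  rw [triAuxA_eq base filled indent char.toList base.toNat 1 [] (by omega) (by omega)]
  simp only [PySem.List.foldl_append_singleton_eq_map, List.nil_append]
  rfl
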